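-- pv_equiv track=rewrite | github.com/Iamadimanna/DATA-STRUCTURE-VISUALSER | ENCRYPT-DECRYPT/main.py | step_2
-- ===== SOURCE A (Python) =====
-- def step_2(sentence):
--     encrypted = ""
--     for i, char in enumerate(sentence):
--         if i % 2 == 0:
--             encrypted += char
--         else:
--             encrypted += sentence[i - 1]
--     return encrypted
-- ===== SOURCE B (Python) =====
-- def step_2(sentence):
--     return ''.join(c + c for c in sentence[::2])[:len(sentence)]
-- ===== Notes on version B (the rewrite author's own statement) =====
-- stated objective: simpler
-- what changed: Replaces the indexed loop with its i%2 branch and per-odd-index lookup by a stride-2 slice whose characters are each doubled via join and the result truncated to the original length.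
import Mathlib
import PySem

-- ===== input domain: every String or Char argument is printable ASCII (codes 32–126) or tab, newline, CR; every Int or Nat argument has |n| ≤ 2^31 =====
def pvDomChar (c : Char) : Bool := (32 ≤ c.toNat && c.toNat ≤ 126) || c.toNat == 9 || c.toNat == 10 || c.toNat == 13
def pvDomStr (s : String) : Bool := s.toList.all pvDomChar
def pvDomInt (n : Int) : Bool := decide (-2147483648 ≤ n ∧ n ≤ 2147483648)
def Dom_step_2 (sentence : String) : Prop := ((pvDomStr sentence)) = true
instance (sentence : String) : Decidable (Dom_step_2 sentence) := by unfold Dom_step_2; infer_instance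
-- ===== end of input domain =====

-- B replaces the indexed loop with its i%2 branch by a stride-2 slice, doubling each kept
-- character and truncating to the original length (simpler, branchless).

-- ===== PORT A =====
-- string concatenation is ported over List Char (the type-convention view of str);
-- sentence[i-1] is ported with PySem.List.pyGet?; at a branch where it is evaluated
-- we have i ≥ 1, so the index is in range and .toList never hits the none (IndexError) case.
def step_2 (sentence : String) : String :=
  String.ofList <|
    (PySem.List.enumerate sentence.toList).foldl
      (fun encrypted p =>
        if p.1 % 2 == 0 then encrypted ++ [p.2]
        else encrypted ++ (PySem.List.pyGet? sentence.toList (p.1 - 1)).toList)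
      []

-- ===== PORT B =====
-- sentence[::2] is PySem.Str.slice? with step 2; step 2 ≠ 0, so the none case is unreachable.
def step_2_alt (sentence : String) : String :=
  match PySem.Str.slice? sentence none none 2 with
  | none => ""
  | some ev =>
      String.ofList ((ev.toList.flatMap (fun c => [c, c])).take sentence.toList.length)

-- ===== PRECONDITION & SPEC =====
def Spec_step_2 (sentence : String) (out : String) : Prop := out = step_2_alt sentence
instance (sentence : String) (out : String) : Decidable (Spec_step_2 sentence out) := by unfold Spec_step_2; infer_instance

-- ===== CLAIM (what is proved, stated in full; the proofs are below) =====
def Claim_equal_step_2 : Prop := ∀ (sentence : String), Dom_step_2 sentence → Spec_step_2 sentence (step_2 sentence)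

-- ===== LEMMAS AND PROOFS =====

-- reference function: duplicate each even-indexed character, keeping the length
def pvDup2 {α : Type} : List α → List α
  | [] => []
  | [a] => [a]
  | a :: _ :: t => a :: a :: pvDup2 t

-- the even-indexed characters
def pvEvens {α : Type} : List α → List α
  | [] => []
  | [a] => [a]
  | a :: _ :: t => a :: pvEvens t

theorem foldA_eq_dup2 {α : Type} (l : List α) :
    ∀ (pre : List α) (acc : List α), pre.length % 2 = 0 →
    (PySem.List.enumerate l (pre.length : Int)).foldl
      (fun encrypted p =>
        if p.1 % 2 == 0 then encrypted ++ [p.2]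
        else encrypted ++ (PySem.List.pyGet? (pre ++ l) (p.1 - 1)).toList)
      acc = acc ++ pvDup2 l := by
  induction l using pvDup2.induct with
  | case1 => intro pre acc h; simp [PySem.List.enumerate, pvDup2]
  | case2 a =>
      intro pre acc h
      simp only [PySem.List.enumerate, List.foldl, pvDup2]
      have : ((pre.length : Int) % 2 == 0) = true := by
        simp only [beq_iff_eq]; omega
      simp [this]
  | case3 a b t ih =>
      intro pre acc h
      simp only [PySem.List.enumerate, List.foldl]
      have h0 : ((pre.length : Int) % 2 == 0) = true := by
        simp only [beq_iff_eq]; omega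
      have h1 : (((pre.length : Int) + 1) % 2 == 0) = false := by
        simp only [beq_eq_false_iff_ne, ne_eq]; omega
      have hidx : (pre.length : Int) + 1 - 1 = ((pre.length : Nat) : Int) := by ring
      have hget : (pre ++ a :: b :: t)[pre.length]? = some a := by
        rw [List.getElem?_append_right (le_refl _)]
        simp
      rw [h0, h1, hidx, PySem.List.pyGet?_natCast, hget]
      simp only [if_true, Bool.false_eq_true, if_false, Option.toList_some]
      have hpre : (pre ++ [a, b]).length % 2 = 0 := by simp; omega
      have := ih (pre ++ [a, b]) (acc ++ [a] ++ [a]) hpre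
      have hlen : ((pre ++ [a, b]).length : Int) = (pre.length : Int) + 1 + 1 := by
        simp; ring
      have happ : (pre ++ [a, b]) ++ t = pre ++ a :: b :: t := by simp
      rw [hlen, happ] at this
      rw [this]
      simp [pvDup2]

theorem filterMap_range_evens {α : Type} (l : List α) :
    ∀ n : Nat, 2 * n ≤ l.length + 1 → l.length ≤ 2 * n →
    List.filterMap (fun k => l[2 * k]?) (List.range n) = pvEvens l := by
  induction l using pvEvens.induct with
  | case1 =>
      intro n h1 h2
      have : n = 0 := by simp only [List.length_nil] at h1; omega
      subst this; simp [pvEvens]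
  | case2 a =>
      intro n h1 h2
      have : n = 1 := by simp only [List.length_cons, List.length_nil] at h1 h2; omega
      subst this; simp [pvEvens, List.range_succ]
  | case3 a b t ih =>
      intro n h1 h2
      simp only [List.length_cons] at h1 h2
      obtain ⟨m, rfl⟩ : ∃ m, n = m + 1 := ⟨n - 1, by omega⟩
      rw [List.range_succ_eq_map]
      simp only [List.filterMap_cons, List.filterMap_map]
      have f0 : (a :: b :: t)[2 * 0]? = some a := by simp
      rw [f0]
      have comp : (fun k => (a :: b :: t)[2 * (k + 1)]?) = (fun k => t[2 * k]?) := by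
        funext k
        have : 2 * (k + 1) = 2 * k + 2 := by ring
        rw [this]
        simp
      have := ih m (by omega) (by omega)
      simp only [Function.comp_def, comp]
      rw [this, pvEvens]

theorem slice2_eq_evens {α : Type} (l : List α) :
    PySem.List.slice? l none none 2 = some (pvEvens l) := by
  simp only [PySem.List.slice?, PySem.List.sliceIndices]
  norm_num
  have hcount : (if 0 < l.length then (((l.length:Int) + 2 - 1) / 2).toNat else 0)
      = (l.length + 1) / 2 := by
    split_ifs with h
    · omega
    · omega
  have harg : (fun k : Nat => l[((2:Int) * (k:Int)).toNat]?) = (fun k : Nat => l[2 * k]?) := by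
    funext k; congr 1
  rw [hcount, harg]
  exact filterMap_range_evens l _ (by omega) (by omega)

theorem dup2_eq_evens_flatMap {α : Type} (l : List α) :
    pvDup2 l = ((pvEvens l).flatMap (fun c => [c, c])).take l.length := by
  induction l using pvDup2.induct with
  | case1 => simp [pvDup2, pvEvens]
  | case2 a => simp [pvDup2, pvEvens]
  | case3 a b t ih =>
      simp only [pvDup2, pvEvens, List.flatMap_cons, List.length_cons]
      rw [List.cons_append, List.cons_append, List.nil_append]
      simp only [List.take_succ_cons]
      rw [ih]

-- ===== VERDICT (by name: the statement is the Claim_ definition above) =====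
theorem step_2_spec : Claim_equal_step_2 := by
  intro sentence _
  unfold Spec_step_2 step_2 step_2_alt
  have hb : PySem.Str.slice? sentence none none 2
      = some (String.ofList (pvEvens sentence.toList)) := by
    have := slice2_eq_evens sentence.toList
    simp only [PySem.Str.slice?, PySem.Chars.slice?_eq_listSlice?, this, Option.map_some]
  rw [hb]
  have ha := foldA_eq_dup2 sentence.toList [] [] (by simp)
  simp only [List.length_nil, Nat.cast_zero, List.nil_append] at ha
  rw [ha, dup2_eq_evens_flatMap]
  congr 1
  simp
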